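-- pv_equiv track=rewrite | github.com/sessionRec/MTD | MTD/utils.py | construct_remap
-- ===== SOURCE A (Python) =====
-- from collections import Counter
--
-- def construct_remap(all_seqs):
--     if all_seqs is None:
--         return None
--     seqs = []
--     for i in all_seqs:
--         seqs.extend(i)
--     cnt = Counter(seqs)
--     cc = cnt.most_common()
--     nodes = [c[0] for c in cc]
--     remap = dict(zip(nodes, range(len(nodes))))
--     return remap
-- ===== SOURCE B (Python) =====
-- def construct_remap(all_seqs):
--     # Counting sort by frequency: count with a plain dict, bucket the distinct
--     # items by their count, then emit buckets from the highest count down,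
--     # assigning ranks directly.
--     if all_seqs is None:
--         return None
--     counts = {}
--     for seq in all_seqs:
--         for x in seq:
--             counts[x] = counts.get(x, 0) + 1
--     if not counts:
--         return {}
--     maxc = max(counts.values())
--     buckets = {}
--     for x, c in counts.items():
--         buckets[c] = buckets.get(c, []) + [x]
--     remap = {}
--     rank = 0
--     for c in range(maxc, 0, -1):
--         for x in buckets.get(c, []):
--             remap[x] = rank
--             rank += 1
--     return remap
-- ===== Notes on version B (the rewrite author's own statement) =====
-- stated objective: alternative
-- what changed: Replaces flatten+Counter.most_common()'s stable sort of all (item,count) pairs plus dict(zip(...)) by a counting sort: count with a plain dict in a nested loop, bucket the distinct items by their count, then walk counts from the maximum down to 1 assigning ranks directly.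
import Mathlib
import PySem

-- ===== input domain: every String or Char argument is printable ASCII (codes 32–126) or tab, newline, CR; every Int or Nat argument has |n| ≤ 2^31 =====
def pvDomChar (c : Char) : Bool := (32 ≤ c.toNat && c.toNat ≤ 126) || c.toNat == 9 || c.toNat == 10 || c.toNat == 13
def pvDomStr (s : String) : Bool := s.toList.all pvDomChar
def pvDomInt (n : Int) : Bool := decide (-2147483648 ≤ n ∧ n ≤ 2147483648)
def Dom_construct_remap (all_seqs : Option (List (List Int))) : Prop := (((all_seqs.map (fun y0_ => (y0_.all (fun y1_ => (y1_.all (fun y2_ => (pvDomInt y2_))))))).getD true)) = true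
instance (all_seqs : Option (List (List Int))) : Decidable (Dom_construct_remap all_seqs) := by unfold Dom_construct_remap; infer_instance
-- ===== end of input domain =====

-- B replaces most_common()'s sort of all items by a counting sort: bucket the
-- distinct items by their count and emit buckets from the highest count down
-- (objective: alternative decomposition, same exact result).

-- ===== PORT A =====
def construct_remap (all_seqs : Option (List (List Int))) : Option (List (Int × Int)) :=
  match all_seqs with
  | none => none
  | some aseqs =>
    -- seqs = []; for i in all_seqs: seqs.extend(i)
    let seqs := aseqs.foldl (fun acc i => acc ++ i) ([] : List Int)
    -- cnt = Counter(seqs)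
    let cnt := PySem.Dict.counter seqs
    -- cc = cnt.most_common()  (= sorted(cnt.items(), key=itemgetter(1), reverse=True), stable)
    let cc := PySem.List.sorted cnt.items (fun c => c.2) true
    -- nodes = [c[0] for c in cc]
    let nodes := cc.map (fun c => c.1)
    -- remap = dict(zip(nodes, range(len(nodes))))
    let remap := PySem.Dict.ofList (nodes.zip (PySem.List.pyRange 0 (nodes.length : Int) 1))
    some remap.items

-- ===== PORT B =====
def construct_remap_alt (all_seqs : Option (List (List Int))) : Option (List (Int × Int)) :=
  match all_seqs with
  | none => none
  | some aseqs =>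
    -- counts = {}; for seq in all_seqs: for x in seq: counts[x] = counts.get(x, 0) + 1
    let counts := aseqs.foldl
      (fun d seq => seq.foldl (fun d x => d.insert x (d.getD x 0 + 1)) d)
      (PySem.Dict.empty : PySem.Dict Int Int)
    -- if not counts: return {}
    if counts.items = [] then some [] else
    -- maxc = max(counts.values())  (guarded non-empty above, so the default is never used)
    let maxc := (PySem.List.max? counts.values (fun v => v)).getD 0
    -- buckets = {}; for x, c in counts.items(): buckets[c] = buckets.get(c, []) + [x]
    let buckets := counts.items.foldl
      (fun (b : PySem.Dict Int (List Int)) p => b.modify p.2 [] (fun l => l ++ [p.1]))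
      PySem.Dict.empty
    -- remap = {}; rank = 0; for c in range(maxc, 0, -1): for x in buckets.get(c, []): remap[x] = rank; rank += 1
    let st := (PySem.List.pyRange maxc 0 (-1)).foldl
      (fun (s : PySem.Dict Int Int × Int) c =>
        (buckets.getD c []).foldl (fun s x => (s.1.insert x s.2, s.2 + 1)) s)
      (PySem.Dict.empty, 0)
    some st.1.items

-- ===== PRECONDITION & SPEC =====
def Spec_construct_remap (all_seqs : Option (List (List Int))) (out : Option (List (Int × Int))) : Prop := out = construct_remap_alt all_seqs
instance (all_seqs : Option (List (List Int))) (out : Option (List (Int × Int))) : Decidable (Spec_construct_remap all_seqs out) := by unfold Spec_construct_remap; infer_instance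

-- ===== CLAIM (what is proved, stated in full; the proofs are below) =====
def Claim_equal_construct_remap : Prop := ∀ (all_seqs : Option (List (List Int))), Dom_construct_remap all_seqs → Spec_construct_remap all_seqs (construct_remap all_seqs)

-- ===== LEMMAS AND PROOFS =====

lemma pyRange_desc (a : Int) :
    PySem.List.pyRange a 0 (-1) = (List.range a.toNat).map (fun (k : Nat) => a - (k : Int)) := by
  simp only [PySem.List.pyRange]
  norm_num
  by_cases h : a ≤ 0
  · simp [not_lt.mpr h, Int.toNat_of_nonpos h]
  · rw [not_le] at h
    simp only [h, if_pos]
    apply List.map_congr_left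
    intro k _; ring

lemma mem_pyRange_desc (a c : Int) : c ∈ PySem.List.pyRange a 0 (-1) ↔ 1 ≤ c ∧ c ≤ a := by
  rw [pyRange_desc]
  simp only [List.mem_map]
  constructor
  · rintro ⟨k, hk, rfl⟩; rw [List.mem_range] at hk; omega
  · rintro ⟨h1, h2⟩
    exact ⟨(a - c).toNat, List.mem_range.mpr (by omega), by omega⟩

lemma pairwise_gt_pyRange_desc (a : Int) :
    (PySem.List.pyRange a 0 (-1)).Pairwise (· > ·) := by
  rw [pyRange_desc, List.pairwise_map]
  refine List.Pairwise.imp ?_ List.pairwise_lt_range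
  intro i j h; simp only [gt_iff_lt]; omega

lemma insertBy_append_not (bef : (Int × Int) → (Int × Int) → Bool) (x : Int × Int)
    (as bs : List (Int × Int)) (h : ∀ a ∈ as, bef x a = false) :
    PySem.List.insertBy bef x (as ++ bs) = as ++ PySem.List.insertBy bef x bs := by
  induction as with
  | nil => simp
  | cons a t ih =>
    have ha : bef x a = false := h a (List.mem_cons_self ..)
    simp only [List.cons_append, PySem.List.insertBy, ha]
    simp only [Bool.false_eq_true, if_false, List.cons_inj_right]
    exact ih (fun a' ha' => h a' (List.mem_cons_of_mem _ ha'))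

lemma insertBy_all_before (bef : (Int × Int) → (Int × Int) → Bool) (x : Int × Int)
    (bs : List (Int × Int)) (h : ∀ b ∈ bs, bef x b = true) :
    PySem.List.insertBy bef x bs = x :: bs := by
  cases bs with
  | nil => rfl
  | cons b t => simp [PySem.List.insertBy, h b (List.mem_cons_self ..)]

lemma insertBy_bucket (ds : List Int) (F : Int → List (Int × Int))
    (hds : ds.Pairwise (· > ·)) (hF : ∀ c, ∀ p ∈ F c, p.2 = c)
    (x : Int × Int) (hx : x.2 ∈ ds) :
    PySem.List.insertBy (fun a b => decide (b.2 < a.2)) x (ds.flatMap F)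
      = ds.flatMap (fun c => if c = x.2 then F c ++ [x] else F c) := by
  induction ds with
  | nil => cases hx
  | cons d ds' ih =>
    have hgt : ∀ c ∈ ds', d > c := fun c hc => List.rel_of_pairwise_cons hds hc
    simp only [List.flatMap_cons]
    rcases List.mem_cons.mp hx with hxd | hxtl
    · -- x.2 = d : skip F d, insert in front of the rest
      rw [insertBy_append_not _ _ _ _ (fun a ha => by
        have := hF d a ha
        simp [this, hxd])]
      rw [insertBy_all_before _ _ _ (fun b hb => by
        rcases List.mem_flatMap.mp hb with ⟨c, hc, hbc⟩
        have h2 := hF c b hbc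
        have := hgt c hc
        simp only [decide_eq_true_eq, h2, hxd]; omega)]
      rw [if_pos hxd.symm]
      have : ds'.flatMap (fun c => if c = x.2 then F c ++ [x] else F c) = ds'.flatMap F := by
        apply List.flatMap_congr  -- maybe wrong name
        intro c hc
        rw [if_neg (by have := hgt c hc; omega)]
      rw [this, List.append_assoc]
      simp
    · -- x.2 in the tail
      have hne : d ≠ x.2 := by
        have : d > x.2 := hgt _ hxtl
        omega
      rw [insertBy_append_not _ _ _ _ (fun a ha => by
        have h2 := hF d a ha
        have : d > x.2 := hgt _ hxtl
        simp only [decide_eq_false_iff_not, h2, not_lt]; omega)]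
      rw [ih (List.Pairwise.of_cons hds) hxtl, if_neg hne]

lemma sorted_rev_eq_flatMap_filter (ds : List Int) (l : List (Int × Int))
    (hds : ds.Pairwise (· > ·)) (hl : ∀ p ∈ l, p.2 ∈ ds) :
    PySem.List.sorted l (fun p => p.2) true
      = ds.flatMap (fun c => l.filter (fun p => p.2 == c)) := by
  rw [PySem.List.sorted_rev_eq_foldl_insertBy]
  induction l using List.reverseRecOn with
  | nil => simp
  | append_singleton t x ih =>
    rw [List.foldl_append, List.foldl_cons, List.foldl_nil,
        ih (fun p hp => hl p (List.mem_append_left _ hp)),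
        insertBy_bucket ds _ hds
          (fun c p hp => by
            have := List.of_mem_filter hp
            simpa using this)
          x (hl x (by simp))]
    apply List.flatMap_congr
    intro c hc
    rw [List.filter_append]
    by_cases h : c = x.2
    · rw [if_pos h]
      simp [List.filter, h]
    · rw [if_neg h]
      have hb : (x.2 == c) = false := by simp; exact fun hh => h hh.symm
      simp [List.filter, hb]

lemma rank_fold_items (ns : List Int) (d : PySem.Dict Int Int) (r : Int)
    (hfresh : ∀ x ∈ ns, d.contains x = false) (hnd : ns.Nodup) :
    (ns.foldl (fun s x => (s.1.insert x s.2, s.2 + 1)) (d, r)).1.items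
      = d.items ++ ns.zip (PySem.List.pyRange r (r + ns.length) 1) := by
  induction ns generalizing d r with
  | nil => simp [PySem.List.pyRange]
  | cons x t ih =>
    have hx : d.contains x = false := hfresh x (by simp)
    rw [List.foldl_cons]
    have harg : r + ((x :: t).length : Int) = (r + 1) + (t.length : Int) := by
      push_cast [List.length_cons]; ring
    rw [harg, PySem.List.pyRange_one_cons (by omega)]
    simp only [List.zip_cons_cons]
    rw [ih (d.insert x r) (r + 1)
        (fun y hy => by
          rw [PySem.Dict.contains_insert]
          have : y ≠ x := fun hh => (List.nodup_cons.mp hnd).1 (hh ▸ hy)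
          simp [this, hfresh y (List.mem_cons_of_mem _ hy)])
        (List.nodup_cons.mp hnd).2]
    rw [PySem.Dict.items_insert_of_not_contains _ _ hx]
    simp

lemma items_ofList_nodup (ps : List (Int × Int)) (h : (ps.map (fun p => p.1)).Nodup) :
    (PySem.Dict.ofList ps).items = ps := by
  have := PySem.Dict.items_foldl_insert_fresh ps (fun p => p.1) (fun p => p.2) PySem.Dict.empty
    (fun a _ => by simp [PySem.Dict.contains_empty]) h
  simpa [PySem.Dict.ofList, PySem.Dict.update] using this

-- ===== VERDICT (by name: the statement is the Claim_ definition above) =====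

lemma foldl_flatMap {α β σ : Type} (ds : List α) (G : α → List β)
    (g : σ → β → σ) (init : σ) :
    ds.foldl (fun s c => (G c).foldl g s) init = (ds.flatMap G).foldl g init := by
  rw [List.flatMap_def, List.foldl_flatten, List.foldl_map]
theorem construct_remap_spec : Claim_equal_construct_remap := by
  intro all_seqs _
  unfold Spec_construct_remap
  cases all_seqs with
  | none => rfl
  | some aseqs =>
    simp only [construct_remap, construct_remap_alt]
    have hA : aseqs.foldl (fun acc i => acc ++ i) ([] : List Int) = aseqs.flatten := by
      simpa using PySem.List.foldl_append_eq_flatten aseqs []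
    have hB : aseqs.foldl
        (fun d seq => seq.foldl (fun d x => d.insert x (d.getD x 0 + 1)) d)
        (PySem.Dict.empty : PySem.Dict Int Int) = PySem.Dict.counter aseqs.flatten := by
      rw [← List.foldl_flatten, PySem.Dict.foldl_insert_getD_add_one_eq_counter]
    rw [hA, hB]
    generalize aseqs.flatten = xs
    by_cases hnil : (PySem.Dict.counter xs).items = []
    · -- no items: both return some []
      have hxs : xs = [] := by
        have := PySem.Dict.items_counter xs
        rw [hnil] at this
        have h2 : PySem.Set.ofList xs = [] := by
          cases h : PySem.Set.ofList xs with
          | nil => rfl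
          | cons a t => rw [h] at this; simp at this
        cases xs with
        | nil => rfl
        | cons a t =>
          exfalso
          have : a ∈ PySem.Set.ofList (a :: t) := (PySem.Set.mem_ofList _ _).mpr (by simp)
          rw [h2] at this; simp at this
      subst hxs
      rw [if_pos hnil]
      rfl
    · rw [if_neg hnil]
      set I := (PySem.Dict.counter xs).items with hIdef
      have hI : I = (PySem.Set.ofList xs).map (fun k => (k, (xs.count k : Int))) :=
        PySem.Dict.items_counter xs
      have hval : (PySem.Dict.counter xs).values = I.map (fun p => p.2) := rfl
      obtain ⟨m, hm⟩ : ∃ m, PySem.List.max? (PySem.Dict.counter xs).values (fun v => v) = some m := by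
        cases h : PySem.List.max? (PySem.Dict.counter xs).values (fun v => v) with
        | some m => exact ⟨m, rfl⟩
        | none =>
          exfalso
          have := (PySem.List.max?_eq_none_iff _ _).mp h
          rw [hval] at this
          exact hnil (List.map_eq_nil_iff.mp this)
      rw [hm]
      simp only [Option.getD_some]
      have hub : ∀ p ∈ I, p.2 ≤ m := by
        intro p hp
        exact PySem.List.max?_isMax hm p.2 (hval ▸ List.mem_map_of_mem hp)
      have hpos : ∀ p ∈ I, 1 ≤ p.2 := by
        intro p hp
        rw [hI] at hp
        obtain ⟨k, hk, rfl⟩ := List.mem_map.mp hp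
        have hkx : k ∈ xs := (PySem.Set.mem_ofList _ _).mp hk
        have : 0 < xs.count k := List.count_pos_iff.mpr hkx
        show (1:Int) ≤ (xs.count k : Int)
        exact_mod_cast this
      have hcov : ∀ p ∈ I, p.2 ∈ PySem.List.pyRange m 0 (-1) := fun p hp =>
        (mem_pyRange_desc m p.2).mpr ⟨hpos p hp, hub p hp⟩
      have hsort : PySem.List.sorted I (fun c => c.2) true
          = (PySem.List.pyRange m 0 (-1)).flatMap (fun c => I.filter (fun p => p.2 == c)) :=
        sorted_rev_eq_flatMap_filter _ _ (pairwise_gt_pyRange_desc m) hcov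
      -- the common node order
      have hns : (PySem.List.sorted I (fun c => c.2) true).map (fun c => c.1)
          = (PySem.List.pyRange m 0 (-1)).flatMap
              (fun c => (I.filter (fun p => p.2 == c)).map (fun p => p.1)) := by
        rw [hsort, List.map_flatMap]
      have hnodup : ((PySem.List.sorted I (fun c => c.2) true).map (fun c => c.1)).Nodup := by
        have hperm := (PySem.List.sorted_perm I (fun c => c.2) true).map (fun c => c.1)
        rw [hperm.nodup_iff, hI, List.map_map]
        have : ((fun c => c.1) ∘ fun k => (k, (xs.count k : Int))) = fun (k : Int) => k := rfl
        rw [this, List.map_id_fun']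
        exact PySem.Set.nodup_ofList xs
      have hbucket : ∀ c, ((I.foldl (fun b p => b.modify p.2 [] fun l => l ++ [p.1])
            PySem.Dict.empty).getD c [])
          = (I.filter (fun p => p.2 == c)).map (fun p => p.1) := by
        intro c
        have h1 : I.foldl (fun b p => b.modify p.2 [] fun l => l ++ [p.1]) PySem.Dict.empty
            = (I.map (fun p => (p.2, p.1))).foldl
                (fun b q => b.modify q.1 [] fun l => l ++ [q.2]) PySem.Dict.empty := by
          rw [List.foldl_map]
        rw [h1, PySem.Dict.getD_foldl_modify_append, List.filter_map, List.map_map]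
        rfl
      have hfun : (fun (s : PySem.Dict Int Int × Int) c =>
            List.foldl (fun s x => (s.1.insert x s.2, s.2 + 1)) s
              ((I.foldl (fun b p => b.modify p.2 [] fun l => l ++ [p.1])
                PySem.Dict.empty).getD c []))
          = (fun (s : PySem.Dict Int Int × Int) c =>
            List.foldl (fun s x => (s.1.insert x s.2, s.2 + 1)) s
              ((I.filter (fun p => p.2 == c)).map (fun p => p.1))) := by
        funext s c
        rw [hbucket]
      rw [hfun, foldl_flatMap, ← hns]
      set nodes := (PySem.List.sorted I (fun c => c.2) true).map (fun c => c.1)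
      rw [rank_fold_items nodes PySem.Dict.empty 0
          (fun x _ => PySem.Dict.contains_empty x) hnodup]
      have hlen : (PySem.List.pyRange 0 (nodes.length : Int) 1).length = nodes.length := by
        rw [PySem.List.pyRange_zero_natCast]
        simp
      rw [items_ofList_nodup _ (by rw [List.map_fst_zip (le_of_eq hlen.symm)]; exact hnodup)]
      simp
      rfl
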